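-- pv_equiv track=rewrite | github.com/Ronaldlicy/Python-Exercises | PythonExercise39.py | semiprime
-- ===== SOURCE A (Python) =====
-- def semiprime(num):
--     prime=0
--     l=[]
--     for i in range(2,num):
--         if num % i == 0:
--             l.append(i)
--         else:
--             prime+=1
--     if num-2==prime:
--         return 'Neither'
--     else:
--         if len(l)==1:
--             return 'Semiprime'
--         elif len(l)==2:
--             return 'Squarefree Semiprime'
--         else:
--             return 'Neither'
-- ===== SOURCE B (Python) =====
-- def semiprime(num):
--     # Trial division up to sqrt(num), counting divisors in pairs, capped at 3.
--     if num < 4: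
--         return 'Neither'
--     count = 0
--     i = 2
--     while i * i <= num and count < 3:
--         if num % i == 0:
--             count += 1
--             if num // i != i:
--                 count += 1
--         i += 1
--     if count == 1:
--         return 'Semiprime'
--     if count == 2:
--         return 'Squarefree Semiprime'
--     return 'Neither'
-- ===== Notes on version B (the rewrite author's own statement) =====
-- stated objective: faster
-- what changed: A scans every i in range(2,num) counting divisors and non-divisors; B trial-divides only up to sqrt(num), counting each divisor together with its cofactor num//i and stopping early once the count reaches 3.
import Mathlib
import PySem

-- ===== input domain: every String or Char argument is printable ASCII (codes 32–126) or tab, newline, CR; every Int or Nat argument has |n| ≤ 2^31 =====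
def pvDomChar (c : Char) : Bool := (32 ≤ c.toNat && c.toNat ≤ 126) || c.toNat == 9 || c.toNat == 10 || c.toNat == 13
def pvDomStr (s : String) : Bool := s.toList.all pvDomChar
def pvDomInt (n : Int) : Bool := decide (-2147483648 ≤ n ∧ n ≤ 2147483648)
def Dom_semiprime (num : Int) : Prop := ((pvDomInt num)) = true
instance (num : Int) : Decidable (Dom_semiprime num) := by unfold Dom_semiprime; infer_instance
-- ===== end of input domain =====

-- B replaces A's scan of all of range(2,num) by trial division up to sqrt(num),
-- counting divisors in pairs and capping the count at 3 (objective: faster).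


-- ===== PORT A =====
def semiprime (num : Int) : String :=
  let st := (PySem.List.pyRange 2 num 1).foldl
    (fun (st : Int × List Int) i =>
      if PySem.Int.mod num i == 0 then (st.1, st.2 ++ [i]) else (st.1 + 1, st.2))
    (0, [])
  if num - 2 == st.1 then "Neither"
  else if st.2.length == 1 then "Semiprime"
  else if st.2.length == 2 then "Squarefree Semiprime"
  else "Neither"

-- ===== PORT B =====
-- the while loop of Source B: trial divisor i, running divisor count (capped at 3);
-- fuel (num+1-i).toNat only makes the loop total: it never runs out while the guard holds
def altLoop : Nat → Int → Int → Int → Int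
  | 0, _, _, count => count
  | fuel + 1, num, i, count =>
    if i * i ≤ num ∧ count < 3 then
      altLoop fuel num (i + 1)
        (if PySem.Int.mod num i == 0 then
          (if PySem.Int.floordiv num i != i then count + 1 + 1 else count + 1)
         else count)
    else count

def semiprime_alt (num : Int) : String :=
  if num < 4 then "Neither"
  else
    let c := altLoop (num + 1 - 2).toNat num 2 0
    if c == 1 then "Semiprime"
    else if c == 2 then "Squarefree Semiprime"
    else "Neither"

-- ===== PRECONDITION & SPEC =====
def Spec_semiprime (num : Int) (out : String) : Prop := out = semiprime_alt num
instance (num : Int) (out : String) : Decidable (Spec_semiprime num out) := by unfold Spec_semiprime; infer_instance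

-- ===== CLAIM (what is proved, stated in full; the proofs are below) =====
def Claim_equal_semiprime : Prop := ∀ (num : Int), Dom_semiprime num → Spec_semiprime num (semiprime num)

-- ===== LEMMAS AND PROOFS =====

-- the divisor test both programs use
def qB (num : Int) : Int → Bool := fun i => PySem.Int.mod num i == 0

-- the set of proper divisors of num that A scans: d ∈ [2, num) with d ∣ num
noncomputable def Dv (num : Int) : Finset Int := (Finset.Ico 2 num).filter (fun d => d ∣ num)

-- contribution of trial divisor j in B's loop
def W (num j : Int) : Int :=
  if j ∣ num ∧ j * j ≤ num then (if j * j = num then 1 else 2) else 0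

-- total contribution of trial divisors ≥ i
noncomputable def T (num i : Int) : Int := ∑ j ∈ Finset.Ico i (num + 1), W num j

-- classification by (capped) proper-divisor count
def classify (k : Int) : String :=
  if k = 1 then "Semiprime" else if k = 2 then "Squarefree Semiprime" else "Neither"

lemma filter_pyRange_eq (num : Int) :
    ((PySem.List.pyRange 2 num 1).filter (qB num)).toFinset = Dv num := by
  ext x
  simp [Dv, PySem.List.mem_pyRange_one, Finset.mem_Ico, qB,
    PySem.Int.mod_eq_zero_iff_dvd]

lemma len_filter (num : Int) :
    ((PySem.List.pyRange 2 num 1).filter (qB num)).length = (Dv num).card := by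
  rw [← filter_pyRange_eq,
    List.toFinset_card_of_nodup (List.Nodup.filter _ (PySem.List.nodup_pyRange_one 2 num))]

lemma A_char (num : Int) : semiprime num = classify ((Dv num).card : Int) := by
  have hfun : (fun (st : Int × List Int) i =>
      if PySem.Int.mod num i == 0 then (st.1, st.2 ++ [i]) else (st.1 + 1, st.2))
      = (fun (st : Int × List Int) i =>
        (if (!(qB num i)) = true then st.1 + 1 else st.1,
         if (qB num i) = true then st.2 ++ [i] else st.2)) := by
    funext st i
    by_cases h : (PySem.Int.mod num i == 0) = true <;> simp [qB, h]
  have h2 := PySem.List.foldl_prod_mk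
    (fun (a : Int) (e : Int) => if (!(qB num e)) = true then a + 1 else a)
    (fun (b : List Int) (e : Int) => if (qB num e) = true then b ++ [e] else b)
    (PySem.List.pyRange 2 num 1) 0 []
  have h3 := PySem.List.foldl_count_if (fun (e : Int) => !(qB num e))
    (PySem.List.pyRange 2 num 1) 0
  have h4 := PySem.List.foldl_append_if (qB num) (fun (x : Int) => x)
    (PySem.List.pyRange 2 num 1) []
  have e1 : (List.filter (qB num) (PySem.List.pyRange 2 num 1)).length
      + (PySem.List.pyRange 2 num 1).countP (fun e => !(qB num e))
      = (num - 2).toNat := by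
    rw [← List.countP_eq_length_filter, ← PySem.List.length_pyRange_one 2 num]
    have hpart := (List.length_eq_countP_add_countP (p := qB num)
      (l := PySem.List.pyRange 2 num 1)).symm
    simpa using hpart
  have hcard := len_filter num
  simp only [semiprime]
  rw [hfun, h2, h3, h4]
  simp only [List.map_id', List.nil_append, zero_add]
  simp only [classify, beq_iff_eq]
  split_ifs <;> first | rfl | omega

lemma W_nonneg (num j : Int) : 0 ≤ W num j := by
  unfold W; split_ifs <;> norm_num

lemma T_nonneg (num i : Int) : 0 ≤ T num i :=
  Finset.sum_nonneg fun j _ => W_nonneg num j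

lemma T_stop (num i : Int) (hi : 2 ≤ i) (h : num < i * i) : T num i = 0 := by
  apply Finset.sum_eq_zero
  intro j hj
  simp only [Finset.mem_Ico] at hj
  unfold W
  rw [if_neg]
  rintro ⟨-, hle⟩
  have hsq : i * i ≤ j * j := mul_le_mul hj.1 hj.1 (by omega) (by omega)
  omega

lemma T_step (num i : Int) (hi : 2 ≤ i) (h : i * i ≤ num) :
    T num i = W num i + T num (i + 1) := by
  have hii : i * 1 ≤ i * i := mul_le_mul_of_nonneg_left (by omega) (by omega)
  rw [mul_one] at hii
  unfold T
  rw [show Finset.Ico i (num + 1) = insert i (Finset.Ico (i + 1) (num + 1)) by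
      ext x; simp only [Finset.mem_Ico, Finset.mem_insert]; omega,
    Finset.sum_insert (by simp [Finset.mem_Ico])]

theorem altLoop_spec (fuel : Nat) (num i count : Int) (hi : 2 ≤ i) (hc : 0 ≤ count)
    (hfuel : num + 1 - i ≤ (fuel : Int)) :
    altLoop fuel num i count = count + T num i ∨
      (3 ≤ altLoop fuel num i count ∧ 3 ≤ count + T num i) := by
  induction fuel generalizing i count with
  | zero =>
    left
    have hii : i * 1 ≤ i * i := mul_le_mul_of_nonneg_left (by omega) (by omega)
    rw [mul_one] at hii
    have hgt : num < i * i := by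
      simp only [Nat.cast_zero] at hfuel
      omega
    simp only [altLoop]
    rw [T_stop num i hi hgt]
    ring
  | succ n ih =>
    simp only [altLoop]
    by_cases h : i * i ≤ num ∧ count < 3
    · rw [if_pos h]
      have hW : (if PySem.Int.mod num i == 0 then
          (if PySem.Int.floordiv num i != i then count + 1 + 1 else count + 1)
         else count) = count + W num i := by
        unfold W
        by_cases hd : i ∣ num
        · obtain ⟨k, hk⟩ := hd
          have hfd : PySem.Int.floordiv num i = k := by
            rw [PySem.Int.floordiv_eq_ediv_of_pos (by omega : (0:Int) < i), hk,
              Int.mul_ediv_cancel_left _ (by omega : i ≠ 0)]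
          have hm : (PySem.Int.mod num i == 0) = true := by
            simp only [beq_iff_eq, PySem.Int.mod_eq_zero_iff_dvd]
            exact Dvd.intro k hk.symm
          by_cases hsq : i * i = num
          · have hk2 : k = i := by
              have hik : i * k = i * i := by rw [← hk, hsq]
              exact (mul_left_cancel₀ (by omega : i ≠ 0) hik)
            rw [hm, if_pos rfl, hfd, hk2]
            simp [hsq, Dvd.intro k hk.symm]
          · have hk2 : k ≠ i := by
              intro hki
              rw [hki] at hk
              exact hsq hk.symm
            rw [hm, if_pos rfl, hfd]
            simp only [if_pos (And.intro (Dvd.intro k hk.symm) h.1), if_neg hsq]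
            rw [if_pos (by simpa using hk2)]
            omega
        · have hm : (PySem.Int.mod num i == 0) = false := by
            simp only [beq_eq_false_iff_ne, ne_eq, PySem.Int.mod_eq_zero_iff_dvd]
            exact hd
          rw [hm, if_neg (by simp), if_neg (by simp [hd])]
          omega
      rw [hW]
      have hii : i * 1 ≤ i * i := mul_le_mul_of_nonneg_left (by omega) (by omega)
      rw [mul_one] at hii
      have hfuel' : num + 1 - (i + 1) ≤ (n : Int) := by
        simp only [Nat.cast_succ] at hfuel
        omega
      have hrec0 := ih (i + 1) (count + W num i) (by omega)
        (by have := W_nonneg num i; omega) hfuel'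
      rw [T_step num i hi h.1]
      rcases hrec0 with hrec | ⟨h3, h3'⟩
      · left; rw [hrec]; ring
      · right
        exact ⟨h3, by linarith⟩
    · rw [if_neg h]
      rcases not_and_or.mp h with h1 | h1
      · left
        rw [T_stop num i hi (by omega)]
        ring
      · right
        have := T_nonneg num i
        constructor <;> omega

-- the large divisor d ↦ num/d lands among the small non-square-root divisors
lemma pair_large (num d : Int) (h4 : 4 ≤ num) (h2 : 2 ≤ d) (hdn : d < num)
    (hdvd : d ∣ num) (hgt : num < d * d) :
    2 ≤ num / d ∧ num / d < num ∧ num / d ∣ num ∧ (num / d) * (num / d) ≤ num ∧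
      (num / d) * (num / d) ≠ num ∧ num / (num / d) = d := by
  obtain ⟨k, hk⟩ := hdvd
  have hq : num / d = k := by
    rw [hk, Int.mul_ediv_cancel_left _ (by omega : d ≠ 0)]
  have hk1 : 0 < k := by
    by_contra hc
    have : d * k ≤ 0 := mul_nonpos_of_nonneg_of_nonpos (by omega) (by omega)
    omega
  have hkne : k ≠ 1 := by intro h; rw [h, mul_one] at hk; omega
  have hkd : k < d := by
    by_contra hc
    have : d * d ≤ d * k := mul_le_mul_of_nonneg_left (by omega) (by omega)
    omega
  have hkk : k * k < d * k := mul_lt_mul_of_pos_right hkd (by omega)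
  have hinv : num / k = d := by
    rw [hk, Int.mul_ediv_cancel _ (by omega : k ≠ 0)]
  have hdvd2 : k ∣ num := ⟨d, by rw [hk]; ring⟩
  rw [hq]
  exact ⟨by omega, by omega, hdvd2, by omega, by omega, hinv⟩

-- the small non-square-root divisor e ↦ num/e lands among the large divisors
lemma pair_small (num e : Int) (h4 : 4 ≤ num) (h2 : 2 ≤ e)
    (hdvd : e ∣ num) (hle : e * e ≤ num) (hne : e * e ≠ num) :
    2 ≤ num / e ∧ num / e < num ∧ num / e ∣ num ∧ num < (num / e) * (num / e) ∧
      num / (num / e) = e := by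
  obtain ⟨k, hk⟩ := hdvd
  have hq : num / e = k := by
    rw [hk, Int.mul_ediv_cancel_left _ (by omega : e ≠ 0)]
  have hk1 : 0 < k := by
    by_contra hc
    have : e * k ≤ 0 := mul_nonpos_of_nonneg_of_nonpos (by omega) (by omega)
    omega
  have hek : e < k := by
    by_contra hc
    have : e * k ≤ e * e := mul_le_mul_of_nonneg_left (by omega) (by omega)
    omega
  have h2k : 2 * k ≤ e * k := mul_le_mul_of_nonneg_right (by omega) (by omega)
  have hkk : e * k < k * k := mul_lt_mul_of_pos_right hek (by omega)
  have hinv : num / k = e := by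
    rw [hk, Int.mul_ediv_cancel _ (by omega : k ≠ 0)]
  have hdvd2 : k ∣ num := ⟨e, by rw [hk]; ring⟩
  rw [hq]
  exact ⟨by omega, by omega, hdvd2, by omega, hinv⟩

lemma T_eq_card (num : Int) (h4 : 4 ≤ num) : T num 2 = ((Dv num).card : Int) := by
  classical
  have hsub : (Dv num).filter (fun d => d * d ≤ num) ⊆ Finset.Ico 2 (num + 1) := by
    intro d hd
    simp only [Dv, Finset.mem_filter, Finset.mem_Ico] at hd ⊢
    omega
  have hT : T num 2 = ∑ j ∈ (Dv num).filter (fun d => d * d ≤ num), W num j := by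
    unfold T
    refine (Finset.sum_subset hsub ?_).symm
    intro x hx hnx
    simp only [Finset.mem_Ico] at hx
    simp only [Dv, Finset.mem_filter, Finset.mem_Ico] at hnx
    unfold W
    rw [if_neg]
    rintro ⟨hdvd, hle⟩
    have h2x : 2 * x ≤ x * x := mul_le_mul_of_nonneg_right (by omega) (by omega)
    exact hnx ⟨⟨⟨hx.1, by omega⟩, hdvd⟩, hle⟩
  have hWS : ∀ j ∈ (Dv num).filter (fun d => d * d ≤ num),
      W num j = 1 + (if ¬ j * j = num then (1:Int) else 0) := by
    intro j hj
    simp only [Dv, Finset.mem_filter, Finset.mem_Ico] at hj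
    unfold W
    rw [if_pos ⟨hj.1.2, hj.2⟩]
    by_cases hsq : j * j = num <;> simp [hsq]
  have hbij : ((Dv num).filter (fun d => ¬ d * d ≤ num)).card
      = (((Dv num).filter (fun d => d * d ≤ num)).filter (fun j => ¬ j * j = num)).card := by
    refine Finset.card_nbij' (fun d => num / d) (fun e => num / e) ?_ ?_ ?_ ?_
    · intro d hd
      simp only [Finset.coe_filter, Set.mem_setOf_eq, Dv,
        Finset.mem_filter, Finset.mem_Ico] at hd ⊢
      obtain ⟨⟨⟨hd2, hdn⟩, hdvd⟩, hgt⟩ := hd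
      obtain ⟨a, b, c, d', e, -⟩ := pair_large num d h4 hd2 hdn hdvd (by omega)
      exact ⟨⟨⟨⟨a, b⟩, c⟩, d'⟩, e⟩
    · intro e he
      simp only [Finset.coe_filter, Set.mem_setOf_eq, Dv,
        Finset.mem_filter, Finset.mem_Ico] at he ⊢
      obtain ⟨⟨⟨⟨he2, hen⟩, hdvd⟩, hle⟩, hne⟩ := he
      obtain ⟨a, b, c, d', -⟩ := pair_small num e h4 he2 hdvd hle hne
      exact ⟨⟨⟨a, b⟩, c⟩, by omega⟩
    · intro d hd
      simp only [Finset.coe_filter, Set.mem_setOf_eq, Dv,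
        Finset.mem_filter, Finset.mem_Ico] at hd
      obtain ⟨⟨⟨hd2, hdn⟩, hdvd⟩, hgt⟩ := hd
      exact (pair_large num d h4 hd2 hdn hdvd (by omega)).2.2.2.2.2
    · intro e he
      simp only [Finset.coe_filter, Set.mem_setOf_eq, Dv,
        Finset.mem_filter, Finset.mem_Ico] at he
      obtain ⟨⟨⟨⟨he2, hen⟩, hdvd⟩, hle⟩, hne⟩ := he
      exact (pair_small num e h4 he2 hdvd hle hne).2.2.2.2
  have hsplit : ((Dv num).filter (fun d => d * d ≤ num)).card
      + ((Dv num).filter (fun d => ¬ d * d ≤ num)).card = (Dv num).card :=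
    Finset.card_filter_add_card_filter_not _
  rw [hT, Finset.sum_congr rfl hWS, Finset.sum_add_distrib, Finset.sum_const,
    Finset.sum_boole]
  simp only [nsmul_eq_mul, mul_one]
  rw [show {x ∈ (Dv num).filter (fun d => d * d ≤ num) | ¬ x * x = num}
      = ((Dv num).filter (fun d => d * d ≤ num)).filter (fun j => ¬ j * j = num) from rfl]
  omega

lemma B_char (num : Int) : semiprime_alt num = classify ((Dv num).card : Int) := by
  simp only [semiprime_alt]
  by_cases h4 : num < 4
  · rw [if_pos h4]
    have hempty : Dv num = ∅ := by
      ext d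
      simp only [Dv, Finset.mem_filter, Finset.mem_Ico, Finset.notMem_empty, iff_false]
      rintro ⟨⟨hd2, hdn⟩, hdvd⟩
      have hd3 : d = 2 ∧ num = 3 := by omega
      rw [hd3.1, hd3.2] at hdvd
      norm_num at hdvd
    rw [hempty]
    simp [classify]
  · rw [if_neg h4]
    rcases altLoop_spec (num + 1 - 2).toNat num 2 0 (by norm_num) (by norm_num) (by omega) with h | ⟨h3, h3'⟩
    · have hc : altLoop (num + 1 - 2).toNat num 2 0 = ((Dv num).card : Int) := by
        rw [h, T_eq_card num (by omega)]; ring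
      rw [hc]
      simp [classify, beq_iff_eq]
    · have hcard : 3 ≤ ((Dv num).card : Int) := by
        rw [← T_eq_card num (by omega)]; omega
      have hne1 : (altLoop (num + 1 - 2).toNat num 2 0 == 1) = false := by
        simpa using (by omega : altLoop (num + 1 - 2).toNat num 2 0 ≠ 1)
      have hne2 : (altLoop (num + 1 - 2).toNat num 2 0 == 2) = false := by
        simpa using (by omega : altLoop (num + 1 - 2).toNat num 2 0 ≠ 2)
      have hg1 : ¬ ((Dv num).card : Int) = 1 := by omega
      have hg2 : ¬ ((Dv num).card : Int) = 2 := by omega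
      rw [hne1, hne2, classify, if_neg hg1, if_neg hg2]
      rfl

-- ===== VERDICT (by name: the statement is the Claim_ definition above) =====
theorem semiprime_spec : Claim_equal_semiprime := by
  intro num _
  unfold Spec_semiprime
  rw [A_char, B_char]
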